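-- pv_equiv track=rewrite | github.com/avyavkumar/meta-learned-lines | training/models/AttentionProtoFOMAML.py | getSortedEpisode
-- ===== SOURCE A (Python) =====
-- def getSortedEpisode(data, labels):
--     kShot = labels.count(0)
--     supportSet = []
--     supportLabels = []
--     querySet = []
--     queryLabels = []
--     for i in range(len(labels)):
--         if supportLabels.count(labels[i]) < kShot // 2:
--             supportSet.append(data[i])
--             supportLabels.append(labels[i])
--         else:
--             querySet.append(data[i])
--             queryLabels.append(labels[i])
--     episodeData = supportSet + querySet
--     episodeLabels = supportLabels + queryLabels
--     return episodeData, episodeLabels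
-- ===== SOURCE B (Python) =====
-- def getSortedEpisode(data, labels):
--     # Group-by-label algorithm: collect per-label index lists, take the first
--     # half-slice of each group wholesale as the support block, the rest as the
--     # query block, and restore original order by sorting the index sets.
--     half = labels.count(0) // 2
--     groups = {}
--     for i, lab in enumerate(labels):
--         groups.setdefault(lab, []).append(i)
--     support = sorted(i for g in groups.values() for i in g[:half])
--     query = sorted(i for g in groups.values() for i in g[half:])
--     order = support + query
--     return [data[i] for i in order], [labels[i] for i in order]
-- ===== Notes on version B (the rewrite author's own statement) =====
-- stated objective: alternative
-- what changed: A streams through labels testing each item against a per-label count-so-far; B has no per-item test at all: it groups indices by label, takes the first half-slice of each group wholesale as the support block and the tail slices as the query block, then sorts the two index sets to restore original order before gathering.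
import Mathlib
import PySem

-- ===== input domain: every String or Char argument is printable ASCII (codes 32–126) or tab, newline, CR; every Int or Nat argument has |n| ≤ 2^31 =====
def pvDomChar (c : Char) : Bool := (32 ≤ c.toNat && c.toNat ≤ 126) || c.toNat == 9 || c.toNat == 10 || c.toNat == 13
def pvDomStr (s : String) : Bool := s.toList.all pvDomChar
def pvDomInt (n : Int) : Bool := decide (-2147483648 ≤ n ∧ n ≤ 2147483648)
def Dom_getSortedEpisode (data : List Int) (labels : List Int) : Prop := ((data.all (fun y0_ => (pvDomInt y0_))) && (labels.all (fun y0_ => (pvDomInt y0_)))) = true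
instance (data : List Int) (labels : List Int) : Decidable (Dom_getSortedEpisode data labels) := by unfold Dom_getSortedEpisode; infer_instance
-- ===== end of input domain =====

-- B replaces A's streaming partition (per-item test against a count-so-far) by a
-- group-by-label algorithm: per-label index lists, first half-slice of each group
-- as support, tail slices as query, sorted to restore order; same return value on Pre_.

-- ===== PORT A =====
def getSortedEpisode (data : List Int) (labels : List Int) : List Int × List Int :=
  let kShot := PySem.List.count labels 0
  let st := (PySem.List.pyRange 0 (labels.length : Int) 1).foldl
    (fun (s : List Int × List Int × List Int × List Int) i =>
      if PySem.List.count s.2.1 (PySem.List.pyGetD labels i 0) < PySem.Int.floordiv kShot 2 then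
        (s.1 ++ [PySem.List.pyGetD data i 0], s.2.1 ++ [PySem.List.pyGetD labels i 0],
         s.2.2.1, s.2.2.2)
      else
        (s.1, s.2.1, s.2.2.1 ++ [PySem.List.pyGetD data i 0],
         s.2.2.2 ++ [PySem.List.pyGetD labels i 0]))
    ([], [], [], [])
  (st.1 ++ st.2.2.1, st.2.1 ++ st.2.2.2)

-- ===== PORT B =====
def getSortedEpisode_alt (data : List Int) (labels : List Int) : List Int × List Int :=
  let half := PySem.Int.floordiv (PySem.List.count labels 0) 2
  let groups := (PySem.List.enumerate labels).foldl
    (fun (d : PySem.Dict Int (List Int)) p => d.modify p.2 [] (· ++ [p.1]))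
    PySem.Dict.empty
  let support := PySem.List.sorted
    (groups.values.flatMap (fun g => PySem.List.slice g none (some half))) (fun x => x) false
  let query := PySem.List.sorted
    (groups.values.flatMap (fun g => PySem.List.slice g (some half) none)) (fun x => x) false
  let order := support ++ query
  (order.map (fun i => PySem.List.pyGetD data i 0),
   order.map (fun i => PySem.List.pyGetD labels i 0))

-- ===== PRECONDITION & SPEC =====
-- Pre_ excludes inputs with fewer data items than labels, on which A raises IndexError.
def Pre_getSortedEpisode (data : List Int) (labels : List Int) : Prop :=
  labels.length ≤ data.length
instance (data : List Int) (labels : List Int) : Decidable (Pre_getSortedEpisode data labels) := by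
  unfold Pre_getSortedEpisode; infer_instance

def pvWitness_getSortedEpisode : List Int × List Int := ([10, 20, 30, 40], [0, 0, 1, 1])

def Spec_getSortedEpisode (data : List Int) (labels : List Int) (out : List Int × List Int) : Prop := out = getSortedEpisode_alt data labels
instance (data : List Int) (labels : List Int) (out : List Int × List Int) : Decidable (Spec_getSortedEpisode data labels out) := by unfold Spec_getSortedEpisode; infer_instance

-- ===== CLAIM (what is proved, stated in full; the proofs are below) =====
def Claim_equal_getSortedEpisode : Prop := ∀ (data : List Int) (labels : List Int), Dom_getSortedEpisode data labels → Pre_getSortedEpisode data labels → Spec_getSortedEpisode data labels (getSortedEpisode data labels)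

-- ===== LEMMAS AND PROOFS =====

def pvHalf (labels : List Int) : Nat := labels.count 0 / 2

-- the j-th item goes to the support set iff its occurrence index so far is < half
def pvFlag (labels : List Int) (j : Nat) : Bool :=
  decide ((labels.take j).count (labels.getD j 0) < pvHalf labels)

lemma pv_count_support (labels : List Int) (n : Nat) (hn : n ≤ labels.length) (x : Int) :
    (((List.range n).filter (pvFlag labels)).map (fun j => labels.getD j 0)).count x
      = min ((labels.take n).count x) (pvHalf labels) := by
  induction n with
  | zero => simp
  | succ n ih =>
    have hn' : n < labels.length := by omega
    set G : Int := labels.getD n 0 with hG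
    have htake : labels.take (n+1) = labels.take n ++ [G] := by
      rw [List.take_add_one, List.getElem?_eq_getElem hn', hG,
          List.getD_eq_getElem labels 0 hn']
      rfl
    rw [List.range_succ, List.filter_append, List.map_append, List.count_append, htake,
        List.count_append, ih (by omega)]
    by_cases ho : (labels.take n).count G < pvHalf labels
    · have hf : pvFlag labels n = true := by
        simp only [pvFlag, ← hG, decide_eq_true_eq]; exact ho
      rw [List.filter_singleton, hf]
      simp only [cond_true, List.map_singleton, ← hG]
      by_cases hx : x = G
      · subst hx; rw [List.count_singleton]; split_ifs <;> omega
      · rw [List.count_singleton]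
        split_ifs with h
        · exact absurd (eq_of_beq h) (Ne.symm hx)
        · omega
    · have hf : pvFlag labels n = false := by
        simp only [pvFlag, ← hG, decide_eq_false_iff_not]; exact ho
      rw [List.filter_singleton, hf]
      simp only [cond_false, List.map_nil, List.count_nil]
      by_cases hx : x = G
      · subst hx; rw [List.count_singleton]; split_ifs <;> omega
      · rw [List.count_singleton]
        split_ifs with h
        · exact absurd (eq_of_beq h) (Ne.symm hx)
        · omega

lemma pv_A_fold (data labels : List Int) (n : Nat) (hn : n ≤ labels.length) :
    ((PySem.List.pyRange 0 (n : Int) 1).foldl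
      (fun (s : List Int × List Int × List Int × List Int) i =>
        if (PySem.List.count s.2.1 (PySem.List.pyGetD labels i 0) : Int)
            < PySem.Int.floordiv (PySem.List.count labels 0) 2 then
          (s.1 ++ [PySem.List.pyGetD data i 0], s.2.1 ++ [PySem.List.pyGetD labels i 0],
           s.2.2.1, s.2.2.2)
        else
          (s.1, s.2.1, s.2.2.1 ++ [PySem.List.pyGetD data i 0],
           s.2.2.2 ++ [PySem.List.pyGetD labels i 0]))
      ([], [], [], []))
    = (((List.range n).filter (pvFlag labels)).map (fun j => data.getD j 0),
       ((List.range n).filter (pvFlag labels)).map (fun j => labels.getD j 0),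
       ((List.range n).filter (fun j => !pvFlag labels j)).map (fun j => data.getD j 0),
       ((List.range n).filter (fun j => !pvFlag labels j)).map (fun j => labels.getD j 0)) := by
  induction n with
  | zero =>
    rw [show ((0:Nat):Int) = 0 from rfl, PySem.List.pyRange_one_eq_nil (by omega)]
    simp
  | succ n ih =>
    rw [show (((n+1:Nat)):Int) = (n:Int)+1 by push_cast; ring,
        PySem.List.pyRange_one_succ_right (by positivity), List.foldl_append,
        ih (by omega)]
    simp only [List.foldl_cons, List.foldl_nil]
    rw [PySem.List.pyGetD_natCast labels n 0, PySem.List.pyGetD_natCast data n 0]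
    rw [PySem.List.count_eq, pv_count_support labels n (by omega) (labels.getD n 0)]
    have hhalf : PySem.Int.floordiv (PySem.List.count labels 0) 2 = ((pvHalf labels : Nat) : Int) := by
      simp [PySem.List.count_eq, pvHalf]
    rw [hhalf]
    by_cases ho : (labels.take n).count (labels.getD n 0) < pvHalf labels
    · have hcond : ((min ((labels.take n).count (labels.getD n 0)) (pvHalf labels) : Nat) : Int) < ((pvHalf labels : Nat) : Int) := by
        push_cast; omega
      rw [if_pos hcond]
      have hf : pvFlag labels n = true := by
        simp only [pvFlag, decide_eq_true_eq]; exact ho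
      simp [List.range_succ, List.filter_append, List.map_append, hf]
    · have hcond : ¬ ((min ((labels.take n).count (labels.getD n 0)) (pvHalf labels) : Nat) : Int) < ((pvHalf labels : Nat) : Int) := by
        push_cast; omega
      rw [if_neg hcond]
      have hf : pvFlag labels n = false := by
        simp only [pvFlag, decide_eq_false_iff_not]; exact ho
      simp [List.range_succ, List.filter_append, List.map_append, hf]

-- indices (as Nats) carrying label c
def pvIdx (labels : List Int) (c : Int) : List Nat :=
  (List.range labels.length).filter (fun t => labels.getD t 0 == c)

-- occurrences of c among the first j labels = number of earlier indices with label c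
lemma pv_count_take (labels : List Int) (c : Int) (j : Nat) (hj : j ≤ labels.length) :
    (labels.take j).count c = ((List.range j).filter (fun t => labels.getD t 0 == c)).length := by
  induction j with
  | zero => simp
  | succ j ih =>
    have hj' : j < labels.length := by omega
    have htake : labels.take (j+1) = labels.take j ++ [labels.getD j 0] := by
      rw [List.take_add_one, List.getElem?_eq_getElem hj', List.getD_eq_getElem labels 0 hj']
      rfl
    rw [htake, List.count_append, List.range_succ, List.filter_append, List.length_append,
        ih (by omega), List.filter_singleton, List.count_singleton]
    by_cases h : labels.getD j 0 = c <;> simp_all [List.getD, beq_iff_eq, cond_eq_ite]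

-- generic: position of the distinguished element in xs ++ y :: ys
lemma pv_mem_take_middle {α : Type} [DecidableEq α] (xs ys : List α) (y : α)
    (hx : y ∉ xs) (hy : y ∉ ys) (h : Nat) :
    (y ∈ (xs ++ y :: ys).take h ↔ xs.length < h) ∧
    (y ∈ (xs ++ y :: ys).drop h ↔ h ≤ xs.length) := by
  rw [List.take_append, List.drop_append]
  constructor
  · constructor
    · intro hmem
      rcases List.mem_append.mp hmem with hm | hm
      · exact absurd (List.mem_of_mem_take hm) hx
      · by_contra hlt
        have : h - xs.length = 0 := by omega
        simp [this] at hm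
    · intro hlt
      refine List.mem_append.mpr (Or.inr ?_)
      have : h - xs.length = (h - xs.length - 1) + 1 := by omega
      rw [this]
      rw [List.take_succ_cons]; exact List.mem_cons_self
  · constructor
    · intro hmem
      rcases List.mem_append.mp hmem with hm | hm
      · exact absurd (List.mem_of_mem_drop hm) hx
      · by_contra hlt
        have : h - xs.length = (h - xs.length - 1) + 1 := by omega
        rw [this] at hm
        simp at hm
        exact hy (List.mem_of_mem_drop hm)
    · intro hle
      have : h - xs.length = 0 := by omega
      simp [this]

lemma pv_filter_range_split (n j : Nat) (p : Nat → Bool) (hj : j < n) (hp : p j = true) :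
    (List.range n).filter p
      = (List.range j).filter p ++ j :: ((List.range (n - j - 1)).map (fun k => j + 1 + k)).filter p := by
  have hn : n = (j + 1) + (n - j - 1) := by omega
  conv_lhs => rw [hn]
  rw [List.range_add, List.filter_append, List.range_succ, List.filter_append,
      List.filter_singleton, hp]
  simp

-- membership in the first-half / tail of a filtered range
lemma pv_mem_take_filter_range (n h j : Nat) (p : Nat → Bool) :
    (j ∈ ((List.range n).filter p).take h ↔ j < n ∧ p j ∧ ((List.range j).filter p).length < h) ∧
    (j ∈ ((List.range n).filter p).drop h ↔ j < n ∧ p j ∧ h ≤ ((List.range j).filter p).length) := by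
  by_cases hjp : j < n ∧ p j = true
  · obtain ⟨hj, hp⟩ := hjp
    rw [pv_filter_range_split n j p hj hp]
    have hx : j ∉ (List.range j).filter p := by
      intro hm; have := List.mem_range.mp (List.mem_of_mem_filter hm); omega
    have hy : j ∉ ((List.range (n - j - 1)).map (fun k => j + 1 + k)).filter p := by
      intro hm
      obtain ⟨k, -, hk⟩ := List.mem_map.mp (List.mem_of_mem_filter hm)
      omega
    obtain ⟨h1, h2⟩ := pv_mem_take_middle _ _ j hx hy h
    constructor
    · rw [h1]; simp [hj, hp]
    · rw [h2]; simp [hj, hp]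
  · have hnm : j ∉ (List.range n).filter p := by
      intro hm
      exact hjp ⟨List.mem_range.mp (List.mem_of_mem_filter hm), List.of_mem_filter hm⟩
    constructor
    · constructor
      · intro hm; exact absurd (List.mem_of_mem_take hm) hnm
      · intro ⟨a, b, _⟩; exact absurd ⟨a, b⟩ hjp
    · constructor
      · intro hm; exact absurd (List.mem_of_mem_drop hm) hnm
      · intro ⟨a, b, _⟩; exact absurd ⟨a, b⟩ hjp

lemma pv_enum_eq (labels : List Int) :
    PySem.List.enumerate labels
      = (List.range labels.length).map (fun (j : Nat) => ((j : Int), labels.getD j 0)) := by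
  rw [PySem.List.enumerate_eq_map_pyRange labels 0, PySem.List.len_eq,
      PySem.List.pyRange_zero_natCast, List.map_map]
  apply List.map_congr_left
  intro j hj
  simp [PySem.List.pyGetD_natCast]

-- the groups dict: lookup
lemma pv_groups_getD (labels : List Int) (c : Int) :
    (((PySem.List.enumerate labels).foldl
      (fun (d : PySem.Dict Int (List Int)) p => d.modify p.2 [] (· ++ [p.1]))
      PySem.Dict.empty).getD c [])
    = (pvIdx labels c).map (fun (j : Nat) => (j : Int)) := by
  have hswap : PySem.List.enumerate labels
      = ((PySem.List.enumerate labels).map Prod.swap).map Prod.swap := by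
    simp [List.map_map, Prod.swap_swap, Function.comp_def]
  rw [hswap, List.foldl_map]
  simp only [Prod.fst_swap, Prod.snd_swap]
  rw [PySem.Dict.getD_foldl_modify_append]
  simp only [PySem.Dict.getD_empty, List.nil_append]
  rw [pv_enum_eq, List.filter_map, List.filter_map, List.map_map, List.map_map]
  simp [pvIdx, Function.comp_def, List.map_eq_flatMap]

lemma pv_groups_keys_nodup (labels : List Int) :
    ((PySem.List.enumerate labels).foldl
      (fun (d : PySem.Dict Int (List Int)) p => d.modify p.2 [] (· ++ [p.1]))
      PySem.Dict.empty).keys.Nodup := by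
  exact PySem.Dict.nodup_keys_foldl_modify_key _ (fun (p : Int × Int) => p.2) []
    (fun _ p g => g ++ [p.1]) _ (by simp)

lemma pv_groups_keys (labels : List Int) :
    ((PySem.List.enumerate labels).foldl
      (fun (d : PySem.Dict Int (List Int)) p => d.modify p.2 [] (· ++ [p.1]))
      PySem.Dict.empty).keys = PySem.Set.ofList labels := by
  rw [PySem.Dict.keys_foldl_modify_key]
  simp [PySem.Dict.keys_empty, PySem.List.map_snd_enumerate, PySem.Set.update,
    PySem.Set.ofList_eq_foldl]

lemma pv_mem_label (labels : List Int) (j : Nat) (hj : j < labels.length) :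
    labels.getD j 0 ∈ PySem.Set.ofList labels := by
  rw [PySem.Set.mem_ofList]
  exact List.getD_eq_getElem labels 0 hj ▸ List.getElem_mem hj

-- the flattened first-half slices are exactly the support indices, as a set
lemma pv_flat_support (labels : List Int) :
    List.Perm ((PySem.Set.ofList labels).flatMap (fun c => (pvIdx labels c).take (pvHalf labels)))
      ((List.range labels.length).filter (pvFlag labels)) := by
  have hS : ((List.range labels.length).filter (pvFlag labels)).Nodup :=
    (List.nodup_range).filter _
  have hmem : ∀ (c : Int) (j : Nat), j ∈ (pvIdx labels c).take (pvHalf labels) ↔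
      j < labels.length ∧ labels.getD j 0 = c ∧
        (labels.take j).count c < pvHalf labels := by
    intro c j
    rw [pvIdx, (pv_mem_take_filter_range labels.length (pvHalf labels) j _).1]
    constructor
    · rintro ⟨h1, h2, h3⟩
      have hc : labels.getD j 0 = c := by simpa using h2
      exact ⟨h1, hc, by rw [pv_count_take labels c j (by omega)]; exact h3⟩
    · rintro ⟨h1, h2, h3⟩
      exact ⟨h1, by simpa using h2, by rw [← pv_count_take labels c j (by omega)]; exact h3⟩
  have hF : ((PySem.Set.ofList labels).flatMap
      (fun c => (pvIdx labels c).take (pvHalf labels))).Nodup := by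
    rw [List.nodup_flatMap]
    constructor
    · intro c _
      exact List.Nodup.sublist (List.take_sublist _ _) ((List.nodup_range).filter _)
    · refine (PySem.Set.nodup_ofList labels).imp ?_
      intro c c' hne j hj hj'
      rw [hmem] at hj hj'
      exact hne (hj.2.1 ▸ hj'.2.1)
  refine (List.perm_ext_iff_of_nodup hF hS).mpr ?_
  intro j
  rw [List.mem_flatMap, List.mem_filter, List.mem_range]
  constructor
  · rintro ⟨c, _, hj⟩
    rw [hmem] at hj
    refine ⟨hj.1, ?_⟩
    simp only [pvFlag, decide_eq_true_eq]
    rw [hj.2.1]; exact hj.2.2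
  · rintro ⟨h1, h2⟩
    refine ⟨labels.getD j 0, pv_mem_label labels j h1, ?_⟩
    rw [hmem]
    refine ⟨h1, rfl, ?_⟩
    simp only [pvFlag, decide_eq_true_eq] at h2; exact h2

-- the flattened tail slices are exactly the query indices, as a set
lemma pv_flat_query (labels : List Int) :
    List.Perm ((PySem.Set.ofList labels).flatMap (fun c => (pvIdx labels c).drop (pvHalf labels)))
      ((List.range labels.length).filter (fun j => !pvFlag labels j)) := by
  have hS : ((List.range labels.length).filter (fun j => !pvFlag labels j)).Nodup :=
    (List.nodup_range).filter _
  have hmem : ∀ (c : Int) (j : Nat), j ∈ (pvIdx labels c).drop (pvHalf labels) ↔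
      j < labels.length ∧ labels.getD j 0 = c ∧
        pvHalf labels ≤ (labels.take j).count c := by
    intro c j
    rw [pvIdx, (pv_mem_take_filter_range labels.length (pvHalf labels) j _).2]
    constructor
    · rintro ⟨h1, h2, h3⟩
      have hc : labels.getD j 0 = c := by simpa using h2
      exact ⟨h1, hc, by rw [pv_count_take labels c j (by omega)]; exact h3⟩
    · rintro ⟨h1, h2, h3⟩
      exact ⟨h1, by simpa using h2, by rw [← pv_count_take labels c j (by omega)]; exact h3⟩
  have hF : ((PySem.Set.ofList labels).flatMap
      (fun c => (pvIdx labels c).drop (pvHalf labels))).Nodup := by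
    rw [List.nodup_flatMap]
    constructor
    · intro c _
      exact List.Nodup.sublist (List.drop_sublist _ _) ((List.nodup_range).filter _)
    · refine (PySem.Set.nodup_ofList labels).imp ?_
      intro c c' hne j hj hj'
      rw [hmem] at hj hj'
      exact hne (hj.2.1 ▸ hj'.2.1)
  refine (List.perm_ext_iff_of_nodup hF hS).mpr ?_
  intro j
  rw [List.mem_flatMap, List.mem_filter, List.mem_range]
  constructor
  · rintro ⟨c, _, hj⟩
    rw [hmem] at hj
    refine ⟨hj.1, ?_⟩
    simp only [pvFlag, Bool.not_eq_eq_eq_not, Bool.not_true, decide_eq_false_iff_not, not_lt]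
    rw [hj.2.1]; exact hj.2.2
  · rintro ⟨h1, h2⟩
    refine ⟨labels.getD j 0, pv_mem_label labels j h1, ?_⟩
    rw [hmem]
    refine ⟨h1, rfl, ?_⟩
    simp only [pvFlag, Bool.not_eq_eq_eq_not, Bool.not_true, decide_eq_false_iff_not, not_lt] at h2
    exact h2

lemma pv_sorted_cast (xs : List Nat) (S : List Nat) (hperm : List.Perm xs S)
    (hS : S.Pairwise (· < ·)) :
    PySem.List.sorted (xs.map (fun (j : Nat) => (j : Int))) (fun x => x) false
      = S.map (fun (j : Nat) => (j : Int)) := by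
  apply PySem.List.sorted_eq_of_perm_of_pairwise_lt
  · exact (hperm.map _).symm
  · exact List.Pairwise.map _ (fun a b h => by exact_mod_cast h) hS

lemma pv_map_cast (xs : List Int) (I : List Nat) :
    (I.map (fun (j : Nat) => (j : Int))).map (fun i => PySem.List.pyGetD xs i 0)
      = I.map (fun j => xs.getD j 0) := by
  rw [List.map_map]
  apply List.map_congr_left
  intro j _
  simp [PySem.List.pyGetD_natCast]

-- B unfolded to the A-side normal form
lemma pv_B_eq (data labels : List Int) :
    getSortedEpisode_alt data labels
      = ((((List.range labels.length).filter (pvFlag labels)).map (fun j => data.getD j 0)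
            ++ ((List.range labels.length).filter (fun j => !pvFlag labels j)).map (fun j => data.getD j 0)),
         (((List.range labels.length).filter (pvFlag labels)).map (fun j => labels.getD j 0)
            ++ ((List.range labels.length).filter (fun j => !pvFlag labels j)).map (fun j => labels.getD j 0))) := by
  unfold getSortedEpisode_alt
  simp only []
  have hnd := pv_groups_keys_nodup labels
  have hhalf : PySem.Int.floordiv (PySem.List.count labels 0) 2 = ((pvHalf labels : Nat) : Int) := by
    simp [PySem.List.count_eq, pvHalf]
  rw [hhalf]
  rw [PySem.Dict.values_eq_map_keys _ hnd []]
  have hgetD : ∀ c, (((PySem.List.enumerate labels).foldl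
      (fun (d : PySem.Dict Int (List Int)) p => d.modify p.2 [] (· ++ [p.1]))
      PySem.Dict.empty).getD c []) = (pvIdx labels c).map (fun (j : Nat) => (j : Int)) :=
    pv_groups_getD labels
  rw [pv_groups_keys labels]
  rw [List.flatMap_map, List.flatMap_map]
  have e1 : (fun c => PySem.List.slice
        (((PySem.List.enumerate labels).foldl
          (fun (d : PySem.Dict Int (List Int)) p => d.modify p.2 [] (· ++ [p.1]))
          PySem.Dict.empty).getD c []) none (some ((pvHalf labels : Nat) : Int)))
      = (fun c => ((pvIdx labels c).take (pvHalf labels)).map (fun (j : Nat) => (j : Int))) := by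
    funext c
    rw [hgetD c, PySem.List.slice_to _ (by positivity), Int.toNat_natCast, List.map_take]
  have e2 : (fun c => PySem.List.slice
        (((PySem.List.enumerate labels).foldl
          (fun (d : PySem.Dict Int (List Int)) p => d.modify p.2 [] (· ++ [p.1]))
          PySem.Dict.empty).getD c []) (some ((pvHalf labels : Nat) : Int)) none)
      = (fun c => ((pvIdx labels c).drop (pvHalf labels)).map (fun (j : Nat) => (j : Int))) := by
    funext c
    rw [hgetD c, PySem.List.slice_from _ (by positivity), Int.toNat_natCast, List.map_drop]
  rw [e1, e2, ← List.map_flatMap, ← List.map_flatMap]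
  have hSlt : ((List.range labels.length).filter (pvFlag labels)).Pairwise (· < ·) :=
    List.pairwise_lt_range.sublist List.filter_sublist
  have hQlt : ((List.range labels.length).filter (fun j => !pvFlag labels j)).Pairwise (· < ·) :=
    List.pairwise_lt_range.sublist List.filter_sublist
  rw [pv_sorted_cast _ _ (pv_flat_support labels) hSlt,
      pv_sorted_cast _ _ (pv_flat_query labels) hQlt,
      ← List.map_append, ← List.map_append, pv_map_cast, pv_map_cast,
      List.map_append, List.map_append]

-- ===== VERDICT (by name: the statement is the Claim_ definition above) =====
theorem getSortedEpisode_spec : Claim_equal_getSortedEpisode := by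
  unfold Claim_equal_getSortedEpisode Spec_getSortedEpisode
  intro data labels _ hpre
  rw [pv_B_eq]
  unfold getSortedEpisode
  simp only []
  rw [pv_A_fold data labels labels.length le_rfl]
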